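-- pv_equiv track=rewrite | github.com/STEPDOCTOR/Trademk1 | app/services/strategies/pairs_trader.py | _same_sector
-- ===== SOURCE A (Python) =====
-- def _same_sector(symbol1: str, symbol2: str) -> bool:
--     """Check if two symbols are in the same sector."""
--     # Simplified sector mapping
--     tech_stocks = ["AAPL", "MSFT", "GOOGL", "META", "NVDA", "AMD", "INTC"]
--     finance_stocks = ["JPM", "BAC", "WFC", "GS", "MS", "V", "MA"]
--     retail_stocks = ["AMZN", "WMT", "TGT", "HD", "LOW", "COST"]
--
--     for sector in [tech_stocks, finance_stocks, retail_stocks]: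
--         if symbol1 in sector and symbol2 in sector:
--             return True
--
--     return False
-- ===== SOURCE B (Python) =====
-- _SECTOR_OF = {
--     "AAPL": "tech", "MSFT": "tech", "GOOGL": "tech", "META": "tech",
--     "NVDA": "tech", "AMD": "tech", "INTC": "tech",
--     "JPM": "finance", "BAC": "finance", "WFC": "finance", "GS": "finance",
--     "MS": "finance", "V": "finance", "MA": "finance",
--     "AMZN": "retail", "WMT": "retail", "TGT": "retail", "HD": "retail",
--     "LOW": "retail", "COST": "retail",
-- }
--
--
-- def _same_sector(symbol1: str, symbol2: str) -> bool:
--     """Check if two symbols are in the same sector."""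
--     s1 = _SECTOR_OF.get(symbol1)
--     return s1 is not None and s1 == _SECTOR_OF.get(symbol2)
-- ===== Notes on version B (the rewrite author's own statement) =====
-- stated objective: idiomatic
-- what changed: Replaced the comparison-time loop over three sector lists with a single symbol-to-sector dict built once; the check becomes two .get lookups and an equality guarded against both symbols being unknown.
import Mathlib
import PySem

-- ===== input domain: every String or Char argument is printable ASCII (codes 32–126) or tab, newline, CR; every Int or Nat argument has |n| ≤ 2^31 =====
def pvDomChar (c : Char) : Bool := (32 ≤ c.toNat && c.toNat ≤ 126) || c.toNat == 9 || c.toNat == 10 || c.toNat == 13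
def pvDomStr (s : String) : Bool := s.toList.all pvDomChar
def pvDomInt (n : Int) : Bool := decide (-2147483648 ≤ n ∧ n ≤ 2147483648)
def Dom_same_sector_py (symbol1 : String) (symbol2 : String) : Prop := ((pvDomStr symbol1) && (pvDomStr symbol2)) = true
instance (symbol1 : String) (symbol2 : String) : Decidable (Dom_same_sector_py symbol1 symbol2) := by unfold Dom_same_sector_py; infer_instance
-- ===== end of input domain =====

-- B replaces A's comparison-time loop over three sector lists by a dict built once
-- (symbol → sector) and two lookups with a both-found guard (objective: idiomatic).

-- ===== PORT A =====
-- the 'for sector in [...]' loop with its early 'return True'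
def pvLoopA : List (List String) → String → String → Bool
  | [], _, _ => false
  | sec :: rest, s1, s2 =>
      if sec.contains s1 && sec.contains s2 then true else pvLoopA rest s1 s2

def same_sector_py (symbol1 : String) (symbol2 : String) : Bool :=
  let tech_stocks := ["AAPL", "MSFT", "GOOGL", "META", "NVDA", "AMD", "INTC"]
  let finance_stocks := ["JPM", "BAC", "WFC", "GS", "MS", "V", "MA"]
  let retail_stocks := ["AMZN", "WMT", "TGT", "HD", "LOW", "COST"]
  pvLoopA [tech_stocks, finance_stocks, retail_stocks] symbol1 symbol2

-- ===== PORT B =====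
-- the module-level dict literal _SECTOR_OF
def pvSectorOf : PySem.Dict String String := PySem.Dict.mk
  [("AAPL", "tech"), ("MSFT", "tech"), ("GOOGL", "tech"), ("META", "tech"),
   ("NVDA", "tech"), ("AMD", "tech"), ("INTC", "tech"),
   ("JPM", "finance"), ("BAC", "finance"), ("WFC", "finance"), ("GS", "finance"),
   ("MS", "finance"), ("V", "finance"), ("MA", "finance"),
   ("AMZN", "retail"), ("WMT", "retail"), ("TGT", "retail"), ("HD", "retail"),
   ("LOW", "retail"), ("COST", "retail")]

def same_sector_py_alt (symbol1 : String) (symbol2 : String) : Bool :=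
  match pvSectorOf.get? symbol1 with
  | none => false                                -- s1 is None
  | some s1 =>
      match pvSectorOf.get? symbol2 with
      | none => false                            -- s1 == None is False
      | some s2 => s1 == s2

-- ===== PRECONDITION & SPEC =====
def Spec_same_sector_py (symbol1 : String) (symbol2 : String) (out : Bool) : Prop := out = same_sector_py_alt symbol1 symbol2
instance (symbol1 : String) (symbol2 : String) (out : Bool) : Decidable (Spec_same_sector_py symbol1 symbol2 out) := by unfold Spec_same_sector_py; infer_instance

-- ===== CLAIM (what is proved, stated in full; the proofs are below) =====
def Claim_equal_same_sector_py : Prop := ∀ (symbol1 : String) (symbol2 : String), Dom_same_sector_py symbol1 symbol2 → Spec_same_sector_py symbol1 symbol2 (same_sector_py symbol1 symbol2)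

-- ===== LEMMAS AND PROOFS =====

def pvTech : List String := ["AAPL", "MSFT", "GOOGL", "META", "NVDA", "AMD", "INTC"]
def pvFin : List String := ["JPM", "BAC", "WFC", "GS", "MS", "V", "MA"]
def pvRet : List String := ["AMZN", "WMT", "TGT", "HD", "LOW", "COST"]

-- first-match lookup over a block of keys all mapped to the same value
theorem pv_get_block (xs : List String) (v : String) (rest : List (String × String)) (s : String) :
    (PySem.Dict.mk ((xs.map (fun x => (x, v))) ++ rest)).get? s =
      if xs.contains s then some v else (PySem.Dict.mk rest).get? s := by
  induction xs with
  | nil => simp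
  | cons x xs ih =>
      simp only [List.map_cons, List.cons_append, PySem.Dict.get?_mk_cons, List.contains_cons, ih]
      by_cases h : x = s
      · subst h; simp
      · have hb : (x == s) = false := by simp [h]
        have hb' : (s == x) = false := by simp [Ne.symm h]
        simp [hb, hb']

-- the dict literal is the three blocks in order
theorem pv_map_split :
    pvSectorOf = PySem.Dict.mk ((pvTech.map (fun x => (x, "tech"))) ++
      ((pvFin.map (fun x => (x, "finance"))) ++ ((pvRet.map (fun x => (x, "retail"))) ++ []))) := by
  rfl

theorem pv_get_char (s : String) :
    pvSectorOf.get? s =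
      if pvTech.contains s then some "tech"
      else if pvFin.contains s then some "finance"
      else if pvRet.contains s then some "retail"
      else none := by
  rw [pv_map_split, pv_get_block, pv_get_block, pv_get_block]
  simp [PySem.Dict.get?]

-- the three literal sector lists are pairwise disjoint
theorem pv_tech_not_fin (s : String) (h : s ∈ pvTech) : s ∉ pvFin := by
  fin_cases h <;> decide

theorem pv_tech_not_ret (s : String) (h : s ∈ pvTech) : s ∉ pvRet := by
  fin_cases h <;> decide

theorem pv_fin_not_ret (s : String) (h : s ∈ pvFin) : s ∉ pvRet := by
  fin_cases h <;> decide

theorem pv_A_eq (s1 s2 : String) :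
    same_sector_py s1 s2 =
      ((pvTech.contains s1 && pvTech.contains s2) ||
       ((pvFin.contains s1 && pvFin.contains s2) ||
        (pvRet.contains s1 && pvRet.contains s2))) := by
  show pvLoopA [pvTech, pvFin, pvRet] s1 s2 = _
  simp only [pvLoopA]
  by_cases h1 : (pvTech.contains s1 && pvTech.contains s2) = true
  · simp [h1]
  · by_cases h2 : (pvFin.contains s1 && pvFin.contains s2) = true
    · simp [h1, h2]
    · by_cases h3 : (pvRet.contains s1 && pvRet.contains s2) = true
      · simp [h1, h2, h3]
      · simp [h1, h2, h3]

-- ===== VERDICT (by name: the statement is the Claim_ definition above) =====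
theorem same_sector_py_spec : Claim_equal_same_sector_py := by
  intro s1 s2 _
  show same_sector_py s1 s2 = same_sector_py_alt s1 s2
  rw [pv_A_eq]
  unfold same_sector_py_alt
  rw [pv_get_char s1, pv_get_char s2]
  by_cases ht1 : s1 ∈ pvTech <;> by_cases hf1 : s1 ∈ pvFin <;> by_cases hr1 : s1 ∈ pvRet <;>
    by_cases ht2 : s2 ∈ pvTech <;> by_cases hf2 : s2 ∈ pvFin <;> by_cases hr2 : s2 ∈ pvRet <;>
    first
      | exact absurd hf1 (pv_tech_not_fin s1 ht1)
      | exact absurd hr1 (pv_tech_not_ret s1 ht1)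
      | exact absurd hr1 (pv_fin_not_ret s1 hf1)
      | exact absurd hf2 (pv_tech_not_fin s2 ht2)
      | exact absurd hr2 (pv_tech_not_ret s2 ht2)
      | exact absurd hr2 (pv_fin_not_ret s2 hf2)
      | simp [List.contains_eq_mem, ht1, hf1, hr1, ht2, hf2, hr2]
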